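-- pv_equiv track=rewrite | github.com/Invisibility17/sylver-coinage | CheckIt/NumericalSemigroupClass.py | ended
-- ===== SOURCE A (Python) =====
-- def ended( S ):
--     test = 0
--     listS = []
--     for n in S:
--         if S[n] == True:
--             listS.append(n)
--     listS.sort()
--     for n in listS:
--         for m in range(listS[1]):
--             if n+m in listS:
--                 test += 1
--             if test == listS[1]:
--                 return True
--         test = 0
--     return False
-- ===== SOURCE B (Python) =====
-- def ended(S):
--     listS = sorted(n for n in S if S[n] == True)
--     if len(listS) < 2:
--         return False
--     threshold = listS[1]
--     run = 0
--     prev = None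
--     for n in listS:
--         if prev is not None and n == prev + 1:
--             run += 1
--         else:
--             run = 1
--         if run == threshold:
--             return True
--         prev = n
--     return False
-- ===== Notes on version B (the rewrite author's own statement) =====
-- stated objective: faster
-- what changed: Instead of A's nested scan (for every element, probe membership of listS[1] successive integers in the list), B sorts the true keys once and makes one linear pass maintaining the current consecutive-run length, returning True the moment the run length equals the second-smallest key.
import Mathlib
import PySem

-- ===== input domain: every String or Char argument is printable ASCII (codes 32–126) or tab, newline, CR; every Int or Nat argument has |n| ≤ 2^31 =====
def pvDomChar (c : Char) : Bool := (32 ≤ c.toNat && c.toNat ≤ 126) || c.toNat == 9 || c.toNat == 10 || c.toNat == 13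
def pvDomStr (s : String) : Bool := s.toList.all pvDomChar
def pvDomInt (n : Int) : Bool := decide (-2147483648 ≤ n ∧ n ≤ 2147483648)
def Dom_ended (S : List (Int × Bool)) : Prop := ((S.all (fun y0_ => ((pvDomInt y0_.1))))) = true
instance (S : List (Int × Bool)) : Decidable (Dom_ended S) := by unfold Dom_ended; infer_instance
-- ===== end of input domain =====

-- B replaces A's nested membership scan by one sorted linear pass tracking the current
-- consecutive-run length (equivalence proved on dicts with ≠ 1 True key; see Pre_ended).

-- ===== PORT A =====
def endedInner (listS : List Int) (t : Int) (n : Int) : List Int → Int → Bool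
  | [], _ => false
  | m :: rest, test =>
      let test' := if listS.contains (n + m) then test + 1 else test
      if test' == t then true else endedInner listS t n rest test'

def endedOuter (listS : List Int) : List Int → Bool
  | [] => false
  | n :: rest =>
      match PySem.List.pyGet? listS 1 with
      | none => false   -- Python raises IndexError (listS[1]) here; excluded by Pre_ended
      | some t =>
          if endedInner listS t n (PySem.List.pyRange 0 t 1) 0 then true
          else endedOuter listS rest

def ended (S : List (Int × Bool)) : Bool :=
  let d := PySem.Dict.mk S
  let listS := d.keys.foldl (fun acc n => if d.get? n == some true then acc ++ [n] else acc) ([] : List Int)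
  let sortedS := PySem.List.sorted listS (fun x => x) false
  endedOuter sortedS sortedS

-- ===== PORT B =====
def altScan (t : Int) (prev : Option Int) (run : Int) : List Int → Bool
  | [] => false
  | n :: rest =>
      let run' := if (match prev with | some p => n == p + 1 | none => false) then run + 1 else 1
      if run' == t then true else altScan t (some n) run' rest

def ended_alt (S : List (Int × Bool)) : Bool :=
  let d := PySem.Dict.mk S
  let listS := PySem.List.sorted (d.keys.filter (fun n => d.get? n == some true)) (fun x => x) false
  if listS.length < 2 then false
  else
    match PySem.List.pyGet? listS 1 with
    | none => false  -- unreachable: listS.length ≥ 2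
    | some threshold => altScan threshold none 0 listS

-- ===== PRECONDITION & SPEC =====
-- Pre_ended excludes (a) association lists with duplicate keys, which do not represent a
-- Python dict (Python's argument is a dict, whose keys are unique), and (b) dicts with
-- exactly one True-valued key, on which A raises IndexError at listS[1] (B returns False there).
def Pre_ended (S : List (Int × Bool)) : Prop :=
  (S.map Prod.fst).Nodup ∧ (S.filter (fun p => p.2)).length ≠ 1
instance (S : List (Int × Bool)) : Decidable (Pre_ended S) := by unfold Pre_ended; infer_instance

def pvWitness_ended : (List (Int × Bool)) := [(2, true), (3, true)]

def Spec_ended (S : List (Int × Bool)) (out : Bool) : Prop := out = ended_alt S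
instance (S : List (Int × Bool)) (out : Bool) : Decidable (Spec_ended S out) := by unfold Spec_ended; infer_instance

-- ===== CLAIM (what is proved, stated in full; the proofs are below) =====
def Claim_equal_ended : Prop := ∀ (S : List (Int × Bool)), Dom_ended S → Pre_ended S → Spec_ended S (ended S)

-- ===== LEMMAS AND PROOFS =====

-- membership of the whole consecutive block n, n+1, …, n+t-1
def Consec (n t : Int) (L : List Int) : Prop := ∀ m : Int, 0 ≤ m → m < t → (n + m) ∈ L

-- A's filtering loop builds exactly the first components of the True pairs (keys unique)
theorem listS_eq (S : List (Int × Bool)) (h : (S.map Prod.fst).Nodup) :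
    ((PySem.Dict.mk S).keys).filter (fun n => (PySem.Dict.mk S).get? n == some true)
      = (S.filter (fun p => p.2)).map Prod.fst := by
  induction S with
  | nil => rfl
  | cons kv rest ih =>
      obtain ⟨k, v⟩ := kv
      simp only [List.map_cons] at h
      have hk : k ∉ rest.map Prod.fst := (List.nodup_cons.mp h).1
      have hrest := (List.nodup_cons.mp h).2
      have hkeys : (PySem.Dict.mk ((k, v) :: rest)).keys = k :: rest.map Prod.fst := by
        simp [PySem.Dict.keys]
      have hkeys' : (PySem.Dict.mk rest).keys = rest.map Prod.fst := by
        simp [PySem.Dict.keys]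
      rw [hkeys, List.filter_cons]
      have hcongr : (rest.map Prod.fst).filter
            (fun n => (PySem.Dict.mk ((k, v) :: rest)).get? n == some true)
          = (rest.map Prod.fst).filter (fun n => (PySem.Dict.mk rest).get? n == some true) := by
        apply List.filter_congr
        intro x hx
        have hxk : (k == x) = false := by
          simp only [beq_eq_false_iff_ne, ne_eq]
          intro e; exact hk (e ▸ hx)
        rw [PySem.Dict.get?_mk_cons, hxk]
        simp
      rw [hcongr]
      rw [hkeys'] at ih
      rw [ih hrest]
      have hheadk : (PySem.Dict.mk ((k, v) :: rest)).get? k = some v := by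
        rw [PySem.Dict.get?_mk_cons]; simp
      rw [hheadk, List.filter_cons]
      cases v <;> simp

-- A's inner loop returns true iff at some prefix the hit count reaches t
theorem innerChar (L : List Int) (t n : Int) (ms : List Int) :
    ∀ c : Int, (endedInner L t n ms c = true ↔
      ∃ i : Nat, 1 ≤ i ∧ i ≤ ms.length ∧
        c + ((ms.take i).countP (fun m => L.contains (n + m)) : Int) = t) := by
  induction ms with
  | nil =>
      intro c
      simp only [endedInner]
      constructor
      · intro h; simp at h
      · rintro ⟨i, h1, h2, -⟩
        simp only [List.length_nil] at h2
        omega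
  | cons m rest ih =>
      intro c
      simp only [endedInner]
      by_cases hmem : L.contains (n + m) = true
      · rw [if_pos hmem]
        by_cases heq : ((c + 1 == t) = true)
        · rw [if_pos heq]
          have ht : c + 1 = t := beq_iff_eq.mp heq
          constructor
          · intro _
            refine ⟨1, le_rfl, by simp, ?_⟩
            rw [show (m :: rest).take 1 = [m] from rfl]
            simp only [List.countP_cons, List.countP_nil, hmem, if_true]
            omega
          · intro _; rfl
        · rw [if_neg heq]
          have hne : c + 1 ≠ t := by intro h; exact heq (by simp [h])
          rw [ih (c + 1)]
          constructor
          · rintro ⟨j, h1, h2, h3⟩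
            refine ⟨j + 1, by omega, by simp only [List.length_cons]; omega, ?_⟩
            simp only [List.take_succ_cons, List.countP_cons, hmem, if_true]
            omega
          · rintro ⟨i, h1, h2, h3⟩
            obtain ⟨j, rfl⟩ : ∃ j, i = j + 1 := ⟨i - 1, by omega⟩
            simp only [List.take_succ_cons, List.countP_cons, hmem, if_true] at h3
            rcases Nat.eq_zero_or_pos j with hj | hj
            · subst hj
              simp at h3
              omega
            · refine ⟨j, by omega, by simp only [List.length_cons] at h2; omega, ?_⟩
              omega
      · have hmem' : L.contains (n + m) = false := by simpa using hmem
        rw [if_neg hmem]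
        by_cases heq : ((c == t) = true)
        · rw [if_pos heq]
          have ht : c = t := beq_iff_eq.mp heq
          constructor
          · intro _
            refine ⟨1, le_rfl, by simp, ?_⟩
            rw [show (m :: rest).take 1 = [m] from rfl]
            simp only [List.countP_cons, List.countP_nil, hmem', Bool.false_eq_true, if_false]
            omega
          · intro _; rfl
        · rw [if_neg heq]
          have hne : c ≠ t := by intro h; exact heq (by simp [h])
          rw [ih c]
          constructor
          · rintro ⟨j, h1, h2, h3⟩
            refine ⟨j + 1, by omega, by simp only [List.length_cons]; omega, ?_⟩
            simp only [List.take_succ_cons, List.countP_cons, hmem', Bool.false_eq_true, if_false]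
            omega
          · rintro ⟨i, h1, h2, h3⟩
            obtain ⟨j, rfl⟩ : ∃ j, i = j + 1 := ⟨i - 1, by omega⟩
            simp only [List.take_succ_cons, List.countP_cons, hmem', Bool.false_eq_true, if_false] at h3
            rcases Nat.eq_zero_or_pos j with hj | hj
            · subst hj
              simp at h3
              omega
            · refine ⟨j, by omega, by simp only [List.length_cons] at h2; omega, ?_⟩
              omega

-- over the full range(t) from 0 that means: t ≥ 1 and the whole block is present
theorem innerFull (L : List Int) (t n : Int) :
    endedInner L t n (PySem.List.pyRange 0 t 1) 0 = true ↔ 1 ≤ t ∧ Consec n t L := by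
  rw [innerChar]
  have hlen : (PySem.List.pyRange 0 t 1).length = t.toNat := by
    rw [PySem.List.length_pyRange_one]; simp
  constructor
  · rintro ⟨i, h1, h2, h3⟩
    rw [hlen] at h2
    have hcle : ((PySem.List.pyRange 0 t 1).take i).countP (fun m => L.contains (n + m)) ≤ i := by
      calc ((PySem.List.pyRange 0 t 1).take i).countP (fun m => L.contains (n + m))
          ≤ ((PySem.List.pyRange 0 t 1).take i).length := List.countP_le_length
        _ ≤ i := by rw [List.length_take]; omega
    have ht1 : 1 ≤ t := by omega
    have hit : i = t.toNat := by omega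
    have hfull : (PySem.List.pyRange 0 t 1).take i = PySem.List.pyRange 0 t 1 :=
      List.take_of_length_le (by omega)
    rw [hfull] at h3
    have hcl : (PySem.List.pyRange 0 t 1).countP (fun m => L.contains (n + m))
        = (PySem.List.pyRange 0 t 1).length := by omega
    have hall := List.countP_eq_length.mp hcl
    refine ⟨ht1, ?_⟩
    intro m h0 hm
    have hmem := hall m (PySem.List.mem_pyRange_one.mpr ⟨by omega, by omega⟩)
    simpa using hmem
  · rintro ⟨ht1, hc⟩
    refine ⟨t.toNat, by omega, by rw [hlen], ?_⟩
    rw [List.take_of_length_le (by rw [hlen])]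
    have hall : ∀ m ∈ PySem.List.pyRange 0 t 1, L.contains (n + m) = true := by
      intro m hm
      rcases PySem.List.mem_pyRange_one.mp hm with ⟨h0, hmt⟩
      simpa using hc m h0 hmt
    rw [List.countP_eq_length.mpr hall, hlen]
    omega

theorem outerChar (L : List Int) (t : Int) (h : PySem.List.pyGet? L 1 = some t) :
    ∀ xs : List Int, (endedOuter L xs = true ↔
      ∃ n ∈ xs, endedInner L t n (PySem.List.pyRange 0 t 1) 0 = true) := by
  intro xs
  induction xs with
  | nil =>
      simp only [endedOuter]
      constructor
      · intro hx; simp at hx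
      · rintro ⟨n, hn, -⟩; simp at hn
  | cons y ys ih =>
      simp only [endedOuter, h]
      by_cases hin : endedInner L t y (PySem.List.pyRange 0 t 1) 0 = true
      · rw [if_pos hin]
        constructor
        · intro _; exact ⟨y, List.mem_cons_self, hin⟩
        · intro _; rfl
      · rw [if_neg hin]
        rw [ih]
        constructor
        · rintro ⟨n, hn, hc⟩
          exact ⟨n, List.mem_cons_of_mem _ hn, hc⟩
        · rintro ⟨n, hn, hc⟩
          rcases List.mem_cons.mp hn with rfl | hn'
          · exact absurd hc hin
          · exact ⟨n, hn', hc⟩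

theorem consec_shift (x n k : Int) (rest : List Int) (hx : x < n) :
    Consec n k (x :: rest) ↔ Consec n k rest := by
  constructor
  · intro h m h0 hm
    rcases List.mem_cons.mp (h m h0 hm) with h' | h'
    · omega
    · exact h'
  · intro h m h0 hm
    exact List.mem_cons_of_mem _ (h m h0 hm)

theorem consec_cons (x k : Int) (rest : List Int) (hrest : ∀ y ∈ rest, x < y) (hk : 1 ≤ k) :
    Consec x k (x :: rest) ↔ Consec (x + 1) (k - 1) rest := by
  constructor
  · intro h m h0 hm
    have hmem := h (m + 1) (by omega) (by omega)
    rcases List.mem_cons.mp hmem with h' | h'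
    · omega
    · have : x + (m + 1) = x + 1 + m := by ring
      rwa [this] at h'
  · intro h m h0 hm
    rcases eq_or_lt_of_le h0 with h0' | h0'
    · subst h0'
      simp
    · have hmem := h (m - 1) (by omega) (by omega)
      have : x + 1 + (m - 1) = x + m := by ring
      rw [this] at hmem
      exact List.mem_cons_of_mem _ hmem

theorem consec_mono (n k k' : Int) (L : List Int) (h : k' ≤ k) : Consec n k L → Consec n k' L := by
  intro hc m h0 hm
  exact hc m h0 (lt_of_lt_of_le hm h)

theorem exists_consec_cons (x t : Int) (rest : List Int) (hrest : ∀ y ∈ rest, x < y) :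
    (∃ n ∈ x :: rest, Consec n t (x :: rest)) ↔
      Consec x t (x :: rest) ∨ ∃ n ∈ rest, Consec n t rest := by
  constructor
  · rintro ⟨n, hn, hc⟩
    rcases List.mem_cons.mp hn with rfl | hn'
    · exact Or.inl hc
    · refine Or.inr ⟨n, hn', ?_⟩
      exact (consec_shift x n t rest (hrest n hn')).mp hc
  · rintro (hc | ⟨n, hn, hc⟩)
    · exact ⟨x, List.mem_cons_self, hc⟩
    · exact ⟨n, List.mem_cons_of_mem _ hn,
        (consec_shift x n t rest (hrest n hn)).mpr hc⟩

theorem altScan_nonpos (t : Int) (ht : t ≤ 0) :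
    ∀ (xs : List Int) (p : Option Int) (r : Int), 0 ≤ r → altScan t p r xs = false := by
  intro xs
  induction xs with
  | nil => intro p r _; rfl
  | cons y ys ih =>
      intro p r hr
      have key : ∀ r' : Int, 1 ≤ r' → (if (r' == t) = true then true else altScan t (some y) r' ys) = false := by
        intro r' hr'
        rw [if_neg (by simp only [beq_iff_eq]; omega)]
        exact ih _ _ (by omega)
      rcases p with _ | q
      · simp only [altScan, Bool.false_eq_true, if_false]
        exact key 1 (by omega)
      · simp only [altScan]
        by_cases hb : (y == q + 1) = true
        · rw [if_pos hb]
          exact key (r + 1) (by omega)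
        · rw [if_neg hb]
          exact key 1 (by omega)

theorem altScanChar (t : Int) :
    ∀ (xs : List Int) (p r : Int), 1 ≤ r → r < t → (p :: xs).Pairwise (· < ·) →
      (altScan t (some p) r xs = true ↔
        Consec (p + 1) (t - r) xs ∨ ∃ n ∈ xs, Consec n t xs) := by
  intro xs
  induction xs with
  | nil =>
      intro p r hr hrt _
      simp only [altScan]
      constructor
      · intro h; exact absurd h (by simp)
      · rintro (hc | ⟨n, hn, _⟩)
        · exact absurd (hc 0 le_rfl (by omega)) (by simp)
        · exact absurd hn (by simp)
  | cons x rest ih =>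
      intro p r hr hrt hpw
      have hpx : p < x := (List.pairwise_cons.mp hpw).1 x List.mem_cons_self
      have hpw' : (x :: rest).Pairwise (· < ·) := (List.pairwise_cons.mp hpw).2
      have hxr : ∀ y ∈ rest, x < y := (List.pairwise_cons.mp hpw').1
      have hex := exists_consec_cons x t rest hxr
      simp only [altScan]
      by_cases hb : (x == p + 1) = true
      · -- the run continues
        have hx : x = p + 1 := beq_iff_eq.mp hb
        rw [if_pos hb]
        by_cases ht1 : ((r + 1 == t) = true)
        · rw [if_pos ht1]
          have ht1' : r + 1 = t := beq_iff_eq.mp ht1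
          constructor
          · intro _
            left
            intro m h0 hm
            have hm0 : m = 0 := by omega
            subst hm0
            have : p + 1 + 0 = x := by omega
            rw [this]
            exact List.mem_cons_self
          · intro _; rfl
        · rw [if_neg ht1]
          have ht1'' : r + 1 < t := by
            have hne : r + 1 ≠ t := by intro h; exact ht1 (by simp [h])
            omega
          rw [ih x (r + 1) (by omega) ht1'' hpw']
          have hcc : Consec x (t - r) (x :: rest) ↔ Consec (x + 1) (t - r - 1) rest :=
            consec_cons x (t - r) rest hxr (by omega)
          have heq1 : t - (r + 1) = t - r - 1 := by ring
          constructor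
          · rintro (ha' | ⟨n, hn, hc⟩)
            · left
              rw [← hx]
              rw [heq1] at ha'
              exact hcc.mpr ha' 
            · exact Or.inr (hex.mpr (Or.inr ⟨n, hn, hc⟩))
          · rintro (ha | hrest)
            · left
              rw [heq1]
              apply hcc.mp
              rw [← hx] at ha
              exact ha
            · rcases hex.mp hrest with hcx | hb2
              · left
                rw [heq1]
                exact hcc.mp (consec_mono x t (t - r) (x :: rest) (by omega) hcx)
              · exact Or.inr hb2
      · -- the run resets to 1
        have hx : x ≠ p + 1 := by simpa using hb
        rw [if_neg hb]
        have ht2 : ¬ ((1 : Int) == t) = true := by simp only [beq_iff_eq]; omega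
        rw [if_neg ht2]
        rw [ih x 1 le_rfl (by omega) hpw']
        have hA : ¬ Consec (p + 1) (t - r) (x :: rest) := by
          intro hc
          have h0 := hc 0 le_rfl (by omega)
          rw [add_zero] at h0
          rcases List.mem_cons.mp h0 with h' | h'
          · exact hx h'.symm
          · have := hxr _ h'
            omega
        have hcc : Consec x t (x :: rest) ↔ Consec (x + 1) (t - 1) rest :=
          consec_cons x t rest hxr (by omega)
        constructor
        · rintro (ha' | ⟨n, hn, hc⟩)
          · exact Or.inr (hex.mpr (Or.inl (hcc.mpr ha')))
          · exact Or.inr (hex.mpr (Or.inr ⟨n, hn, hc⟩))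
        · rintro (ha | hrest)
          · exact absurd ha hA
          · rcases hex.mp hrest with hcx | hb2
            · exact Or.inl (hcc.mp hcx)
            · exact Or.inr hb2


theorem altChar (t x0 : Int) (tl : List Int) (hpw : (x0 :: tl).Pairwise (· < ·)) :
    altScan t none 0 (x0 :: tl) = true ↔ 1 ≤ t ∧ ∃ n ∈ x0 :: tl, Consec n t (x0 :: tl) := by
  have hxr : ∀ y ∈ tl, x0 < y := (List.pairwise_cons.mp hpw).1
  have hex := exists_consec_cons x0 t tl hxr
  simp only [altScan, Bool.false_eq_true, if_false]
  by_cases ht1 : ((1 : Int) == t) = true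
  · rw [if_pos ht1]
    have h1 : (1 : Int) = t := beq_iff_eq.mp ht1
    constructor
    · intro _
      refine ⟨by omega, x0, List.mem_cons_self, ?_⟩
      intro m h0 hm
      have hm0 : m = 0 := by omega
      subst hm0; rw [add_zero]; exact List.mem_cons_self
    · intro _; rfl
  · rw [if_neg ht1]
    have hne : (1 : Int) ≠ t := by intro h; exact ht1 (by simp [h])
    by_cases ht0 : t ≤ 0
    · rw [altScan_nonpos t ht0 tl (some x0) 1 (by omega)]
      constructor
      · intro h; simp at h
      · rintro ⟨ht3, -⟩; exact absurd ht3 (by omega)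
    · have ht2 : 1 < t := by omega
      rw [altScanChar t tl x0 1 le_rfl ht2 hpw]
      have hcc : Consec x0 t (x0 :: tl) ↔ Consec (x0 + 1) (t - 1) tl :=
        consec_cons x0 t tl hxr (by omega)
      constructor
      · rintro (ha | ⟨n, hn, hc⟩)
        · exact ⟨by omega, hex.mpr (Or.inl (hcc.mpr ha))⟩
        · exact ⟨by omega, hex.mpr (Or.inr ⟨n, hn, hc⟩)⟩
      · rintro ⟨-, hx⟩
        rcases hex.mp hx with h | h
        · exact Or.inl (hcc.mp h)
        · exact Or.inr h


-- on a strictly increasing list of length ≠ 1 the two loop shapes agree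
theorem outer_eq_scan (L : List Int) (hlt : L.Pairwise (· < ·)) (hlen : L.length ≠ 1) :
    endedOuter L L = (if L.length < 2 then false
      else match PySem.List.pyGet? L 1 with
        | none => false
        | some t => altScan t none 0 L) := by
  rcases L with _ | ⟨x0, L'⟩
  · simp [endedOuter]
  rcases L' with _ | ⟨x1, tl⟩
  · simp at hlen
  have hget : PySem.List.pyGet? (x0 :: x1 :: tl) 1 = some x1 := by
    simp [PySem.List.pyGet?, PySem.List.pyIdx?]
  rw [hget, if_neg (by simp)]
  have h1 := outerChar (x0 :: x1 :: tl) x1 hget (x0 :: x1 :: tl)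
  have h2 := altChar x1 x0 (x1 :: tl) hlt
  rw [Bool.eq_iff_iff, h1, h2]
  constructor
  · rintro ⟨n, hn, hin⟩
    rw [innerFull] at hin
    exact ⟨hin.1, n, hn, hin.2⟩
  · rintro ⟨ht, n, hn, hc⟩
    exact ⟨n, hn, (innerFull _ _ _).mpr ⟨ht, hc⟩⟩

-- ===== VERDICT (by name: the statement is the Claim_ definition above) =====
theorem ended_spec : Claim_equal_ended := by
  intro S _ hpre
  obtain ⟨hnd, hlen⟩ := hpre
  unfold Spec_ended
  have hnd' : ((PySem.Dict.mk S).keys).Nodup := by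
    simpa [PySem.Dict.keys, PySem.Dict.mk] using hnd
  have hl0nd : (((PySem.Dict.mk S).keys).filter
      (fun n => (PySem.Dict.mk S).get? n == some true)).Nodup := List.Nodup.filter _ hnd'
  have hperm := PySem.List.sorted_perm (((PySem.Dict.mk S).keys).filter
      (fun n => (PySem.Dict.mk S).get? n == some true)) (fun x => x) false
  have hndL := hperm.symm.nodup hl0nd
  have hle := PySem.List.sorted_pairwise (((PySem.Dict.mk S).keys).filter
      (fun n => (PySem.Dict.mk S).get? n == some true)) (fun x => x)
  have hlt : (PySem.List.sorted (((PySem.Dict.mk S).keys).filter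
      (fun n => (PySem.Dict.mk S).get? n == some true)) (fun x => x) false).Pairwise (· < ·) := by
    have hand := List.Pairwise.and hle hndL
    exact hand.imp (fun h => lt_of_le_of_ne h.1 h.2)
  have hlenL : (PySem.List.sorted (((PySem.Dict.mk S).keys).filter
      (fun n => (PySem.Dict.mk S).get? n == some true)) (fun x => x) false).length ≠ 1 := by
    rw [PySem.List.length_sorted, listS_eq S hnd, List.length_map]
    exact hlen
  have hfold : ((PySem.Dict.mk S).keys).foldl
      (fun acc n => if (PySem.Dict.mk S).get? n == some true then acc ++ [n] else acc)
      ([] : List Int)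
      = ((PySem.Dict.mk S).keys).filter (fun n => (PySem.Dict.mk S).get? n == some true) := by
    rw [PySem.List.foldl_append_if (fun n => (PySem.Dict.mk S).get? n == some true)
      (fun x => x) ((PySem.Dict.mk S).keys) ([] : List Int)]
    simp
  have hA : ended S = endedOuter
      (PySem.List.sorted (((PySem.Dict.mk S).keys).filter
        (fun n => (PySem.Dict.mk S).get? n == some true)) (fun x => x) false)
      (PySem.List.sorted (((PySem.Dict.mk S).keys).filter
        (fun n => (PySem.Dict.mk S).get? n == some true)) (fun x => x) false) := by
    show endedOuter
        (PySem.List.sorted (((PySem.Dict.mk S).keys).foldl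
          (fun acc n => if (PySem.Dict.mk S).get? n == some true then acc ++ [n] else acc)
          ([] : List Int)) (fun x => x) false)
        (PySem.List.sorted (((PySem.Dict.mk S).keys).foldl
          (fun acc n => if (PySem.Dict.mk S).get? n == some true then acc ++ [n] else acc)
          ([] : List Int)) (fun x => x) false) = _
    rw [hfold]
  rw [hA]
  have hB : ended_alt S = (if (PySem.List.sorted (((PySem.Dict.mk S).keys).filter
        (fun n => (PySem.Dict.mk S).get? n == some true)) (fun x => x) false).length < 2 then false
      else match PySem.List.pyGet? (PySem.List.sorted (((PySem.Dict.mk S).keys).filter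
        (fun n => (PySem.Dict.mk S).get? n == some true)) (fun x => x) false) 1 with
        | none => false
        | some threshold => altScan threshold none 0
            (PySem.List.sorted (((PySem.Dict.mk S).keys).filter
              (fun n => (PySem.Dict.mk S).get? n == some true)) (fun x => x) false)) := rfl
  rw [hB]
  exact outer_eq_scan _ hlt hlenL
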